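-- pv_equiv track=rewrite | github.com/GwanLiZa/ec2203-digital-design | Q4.py | gate_to_minterms
-- ===== SOURCE A (Python) =====
-- from itertools import product
--
-- def gate_to_minterms(gate):
--     n = len(gate)
--
--     fixed = {}
--     free = []
--
--     for i, v in enumerate(gate):
--         if v == 1:
--             fixed[i] = 1
--         elif v == 0:
--             fixed[i] = 0
--         else:
--             free.append(i)
--
--     mins = []
--
--     for comb in product([0,1], repeat = len(free)):
--         bits = [0] * n
--
--         for k, v in fixed.items():
--             bits[k] = v
--
--         for i, idx in enumerate(free):
--             bits[idx] = comb[i]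
--
--         mins.append(int("".join(map(str, bits)), 2))
--
--     return mins
-- ===== SOURCE B (Python) =====
-- def gate_to_minterms(gate):
--     n = len(gate)
--     base = 0
--     weights = []
--     for i, v in enumerate(gate):
--         w = 1 << (n - 1 - i)
--         if v == 1:
--             base += w
--         elif v != 0:
--             weights.append(w)
--     vals = [base]
--     for w in weights:
--         vals = [x for v in vals for x in (v, v + w)]
--     return vals
-- ===== Notes on version B (the rewrite author's own statement) =====
-- stated objective: faster
-- what changed: B precomputes the base value of the fixed 1-bits and a power-of-two weight per free position, then generates all minterms by successively doubling the value list (v -> v, v+w), instead of materialising and re-reading an n-bit list and parsing it as a binary string for each of the 2^f combinations.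
import Mathlib
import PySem

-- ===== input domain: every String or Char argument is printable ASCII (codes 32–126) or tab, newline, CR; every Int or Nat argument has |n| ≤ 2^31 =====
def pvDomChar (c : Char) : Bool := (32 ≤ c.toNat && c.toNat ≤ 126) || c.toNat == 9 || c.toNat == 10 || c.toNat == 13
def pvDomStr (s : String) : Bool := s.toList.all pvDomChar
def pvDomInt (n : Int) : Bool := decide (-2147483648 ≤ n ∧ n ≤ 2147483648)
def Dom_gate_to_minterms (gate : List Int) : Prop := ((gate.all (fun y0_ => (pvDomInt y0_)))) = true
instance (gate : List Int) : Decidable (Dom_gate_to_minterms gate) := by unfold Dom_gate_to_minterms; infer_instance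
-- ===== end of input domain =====

-- B replaces "build an n-bit list and parse it as a binary string for each of the 2^f combinations"
-- by "precompute base value + per-free-position weights, then double the value list once per weight".

-- ===== PORT A =====
-- int("".join(map(str, bits)), 2) ported by hand: exact for nonempty lists of 0/1 digits (guaranteed under Pre_).
def pvBitsToInt (bits : List Int) : Int :=
  bits.foldl (fun a b => a * 2 + b) 0

-- itertools.product([0,1], repeat = m) ported by hand: exact (leftmost position varies slowest).
def pvProduct01 : Nat → List (List Int)
  | 0 => [[]]
  | m + 1 => ((pvProduct01 m).map (fun c => 0 :: c)) ++ ((pvProduct01 m).map (fun c => 1 :: c))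

def gate_to_minterms (gate : List Int) : List Int :=
  let n := gate.length
  let st := (PySem.List.enumerate gate).foldl
      (fun (st : PySem.Dict Int Int × List Int) iv =>
        if iv.2 = 1 then (st.1.insert iv.1 1, st.2)
        else if iv.2 = 0 then (st.1.insert iv.1 0, st.2)
        else (st.1, st.2 ++ [iv.1]))
      (PySem.Dict.empty, [])
  -- bits[k] = v / bits[idx] = comb[i] use the total forms pySetD / pyGetD: every index is in range here
  (pvProduct01 st.2.length).foldl (fun mins comb =>
    let bits := List.replicate n (0 : Int)
    let bits := st.1.items.foldl (fun bits kv => PySem.List.pySetD bits kv.1 kv.2) bits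
    let bits := (PySem.List.enumerate st.2).foldl
        (fun bits p => PySem.List.pySetD bits p.2 (PySem.List.pyGetD comb p.1 0)) bits
    mins ++ [pvBitsToInt bits]) []

-- ===== PORT B =====
def gate_to_minterms_alt (gate : List Int) : List Int :=
  let n := gate.length
  let bw := (PySem.List.enumerate gate).foldl
      (fun (st : Int × List Int) iv =>
        -- w = 1 << (n - 1 - i): exact, since 0 ≤ i < n on every element of enumerate gate
        if iv.2 = 1 then (st.1 + 2 ^ (n - 1 - iv.1.toNat), st.2)
        else if iv.2 ≠ 0 then (st.1, st.2 ++ [(2 : Int) ^ (n - 1 - iv.1.toNat)])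
        else st)
      (0, [])
  bw.2.foldl (fun vals w => vals.flatMap (fun x => [x, x + w])) [bw.1]

-- ===== PRECONDITION & SPEC =====
-- Pre_ excludes only the empty gate list, on which A raises ValueError (int("", 2)).
def Pre_gate_to_minterms (gate : List Int) : Prop := gate ≠ []
instance (gate : List Int) : Decidable (Pre_gate_to_minterms gate) := by unfold Pre_gate_to_minterms; infer_instance
def pvWitness_gate_to_minterms : List Int := [1, 0, 5]

def Spec_gate_to_minterms (gate : List Int) (out : List Int) : Prop := out = gate_to_minterms_alt gate
instance (gate : List Int) (out : List Int) : Decidable (Spec_gate_to_minterms gate out) := by unfold Spec_gate_to_minterms; infer_instance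

-- ===== CLAIM (what is proved, stated in full; the proofs are below) =====
def Claim_equal_gate_to_minterms : Prop := ∀ (gate : List Int), Dom_gate_to_minterms gate → Pre_gate_to_minterms gate → Spec_gate_to_minterms gate (gate_to_minterms gate)

-- ===== LEMMAS AND PROOFS =====

-- fixed positions (with their bit) and free positions of a gate suffix starting at absolute index k
def pvFixedPairs : List Int → Nat → List (Nat × Int)
  | [], _ => []
  | v :: g, k => if v = 1 then (k, 1) :: pvFixedPairs g (k + 1)
                 else if v = 0 then (k, 0) :: pvFixedPairs g (k + 1)
                 else pvFixedPairs g (k + 1)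

def pvFreeIdx : List Int → Nat → List Nat
  | [], _ => []
  | v :: g, k => if v = 1 then pvFreeIdx g (k + 1)
                 else if v = 0 then pvFreeIdx g (k + 1)
                 else k :: pvFreeIdx g (k + 1)

-- value contributed by the fixed 1-bits, and the weights of the free positions
def pvBase : List Int → Int
  | [] => 0
  | v :: g => (if v = 1 then (2 : Int) ^ g.length else 0) + pvBase g

def pvWeights : List Int → List Int
  | [] => []
  | v :: g => if v = 1 then pvWeights g
              else if v = 0 then pvWeights g
              else (2 : Int) ^ g.length :: pvWeights g

def pvDot : List Int → List Int → Int
  | c :: cs, w :: ws => c * w + pvDot cs ws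
  | _, _ => 0

def pvDotFrom (c : List Int) : Int → List Int → Int
  | _, [] => 0
  | i, w :: ws => PySem.List.pyGetD c i 0 * w + pvDotFrom c (i + 1) ws

-- the bit list A assembles for combination c (reading c from index i on)
def pvMerge : List Int → List Int → Int → List Int
  | [], _, _ => []
  | v :: g, c, i => if v = 1 then 1 :: pvMerge g c i
                    else if v = 0 then 0 :: pvMerge g c i
                    else PySem.List.pyGetD c i 0 :: pvMerge g c (i + 1)

def pvSetN : List Int → List (Nat × Int) → List Int
  | bs, [] => bs
  | bs, p :: ps => pvSetN (bs.set p.1 p.2) ps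

def pvFreeSet (c : List Int) : List Nat → Int → List Int → List Int
  | [], _, b => b
  | j :: js, i, b => pvFreeSet c js (i + 1) (b.set j (PySem.List.pyGetD c i 0))

lemma pvA1 (g : List Int) : ∀ (k : Nat) (d : PySem.Dict Int Int) (fr : List Int),
    (∀ x ∈ d.keys, x < (k : Int)) →
    ((PySem.List.enumerate g (k : Int)).foldl
      (fun (st : PySem.Dict Int Int × List Int) iv =>
        if iv.2 = 1 then (st.1.insert iv.1 1, st.2)
        else if iv.2 = 0 then (st.1.insert iv.1 0, st.2)
        else (st.1, st.2 ++ [iv.1])) (d, fr)).1.items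
      = d.items ++ (pvFixedPairs g k).map (fun p => ((p.1 : Int), p.2))
  ∧ ((PySem.List.enumerate g (k : Int)).foldl
      (fun (st : PySem.Dict Int Int × List Int) iv =>
        if iv.2 = 1 then (st.1.insert iv.1 1, st.2)
        else if iv.2 = 0 then (st.1.insert iv.1 0, st.2)
        else (st.1, st.2 ++ [iv.1])) (d, fr)).2
      = fr ++ (pvFreeIdx g k).map (fun j : Nat => (j : Int)) := by
  induction g with
  | nil =>
      intro k d fr hd
      simp [PySem.List.enumerate_nil, pvFixedPairs, pvFreeIdx]
  | cons v g ih =>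
      intro k d fr hd
      simp only [PySem.List.enumerate_cons, List.foldl_cons]
      have hkk : ((k : Int) + 1) = ((k + 1 : Nat) : Int) := by push_cast; ring
      have hkfresh : d.contains (k : Int) = false := by
        rw [PySem.Dict.contains_eq_decide_mem_keys]
        exact decide_eq_false (fun hm => absurd (hd _ hm) (lt_irrefl _))
      have hkeys1 : ∀ (w : Int), ∀ x ∈ (d.insert (k : Int) w).keys, x < ((k + 1 : Nat) : Int) := by
        intro w x hx
        rw [PySem.Dict.keys_insert_of_not_contains _ _ hkfresh] at hx
        rcases List.mem_append.mp hx with hx | hx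
        · have := hd _ hx; push_cast; omega
        · simp at hx; subst hx; push_cast; omega
      have hkeys0 : ∀ x ∈ d.keys, x < ((k + 1 : Nat) : Int) := by
        intro x hx; have := hd _ hx; push_cast; omega
      by_cases h1 : v = 1
      · have hstep : (if ((k : Int), v).2 = 1 then (((d, fr) : PySem.Dict Int Int × List Int).1.insert ((k : Int), v).1 1, ((d, fr) : PySem.Dict Int Int × List Int).2)
            else if ((k : Int), v).2 = 0 then (((d, fr) : PySem.Dict Int Int × List Int).1.insert ((k : Int), v).1 0, ((d, fr) : PySem.Dict Int Int × List Int).2)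
            else (((d, fr) : PySem.Dict Int Int × List Int).1, ((d, fr) : PySem.Dict Int Int × List Int).2 ++ [((k : Int), v).1]))
            = (d.insert (k : Int) 1, fr) := by simp [h1]
        rw [hstep, hkk]
        obtain ⟨ha, hb⟩ := ih (k + 1) (d.insert (k : Int) 1) fr (hkeys1 1)
        refine ⟨?_, ?_⟩
        · rw [ha, PySem.Dict.items_insert_of_not_contains _ _ hkfresh]
          simp [pvFixedPairs, h1, List.append_assoc]
        · rw [hb]; simp [pvFreeIdx, h1]
      · by_cases h0 : v = 0
        · have hstep : (if ((k : Int), v).2 = 1 then (((d, fr) : PySem.Dict Int Int × List Int).1.insert ((k : Int), v).1 1, ((d, fr) : PySem.Dict Int Int × List Int).2)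
              else if ((k : Int), v).2 = 0 then (((d, fr) : PySem.Dict Int Int × List Int).1.insert ((k : Int), v).1 0, ((d, fr) : PySem.Dict Int Int × List Int).2)
              else (((d, fr) : PySem.Dict Int Int × List Int).1, ((d, fr) : PySem.Dict Int Int × List Int).2 ++ [((k : Int), v).1]))
              = (d.insert (k : Int) 0, fr) := by simp [h0, h1]
          rw [hstep, hkk]
          obtain ⟨ha, hb⟩ := ih (k + 1) (d.insert (k : Int) 0) fr (hkeys1 0)
          refine ⟨?_, ?_⟩
          · rw [ha, PySem.Dict.items_insert_of_not_contains _ _ hkfresh]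
            simp [pvFixedPairs, h0, h1, List.append_assoc]
          · rw [hb]; simp [pvFreeIdx, h0, h1]
        · have hstep : (if ((k : Int), v).2 = 1 then (((d, fr) : PySem.Dict Int Int × List Int).1.insert ((k : Int), v).1 1, ((d, fr) : PySem.Dict Int Int × List Int).2)
              else if ((k : Int), v).2 = 0 then (((d, fr) : PySem.Dict Int Int × List Int).1.insert ((k : Int), v).1 0, ((d, fr) : PySem.Dict Int Int × List Int).2)
              else (((d, fr) : PySem.Dict Int Int × List Int).1, ((d, fr) : PySem.Dict Int Int × List Int).2 ++ [((k : Int), v).1]))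
              = (d, fr ++ [(k : Int)]) := by simp [h0, h1]
          rw [hstep, hkk]
          obtain ⟨ha, hb⟩ := ih (k + 1) d (fr ++ [(k : Int)]) hkeys0
          refine ⟨?_, ?_⟩
          · rw [ha]; simp [pvFixedPairs, h0, h1]
          · rw [hb]; simp [pvFreeIdx, h0, h1, List.append_assoc]

lemma pvShiftFix (g : List Int) : ∀ k, pvFixedPairs g (k + 1) = (pvFixedPairs g k).map (fun p => (p.1 + 1, p.2)) := by
  induction g with
  | nil => intro k; simp [pvFixedPairs]
  | cons v g ih => intro k; simp only [pvFixedPairs]; split_ifs <;> simp [ih]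

lemma pvShiftFree (g : List Int) : ∀ k, pvFreeIdx g (k + 1) = (pvFreeIdx g k).map (· + 1) := by
  induction g with
  | nil => intro k; simp [pvFreeIdx]
  | cons v g ih => intro k; simp only [pvFreeIdx]; split_ifs <;> simp [ih]

lemma pvSetN_shift (ps : List (Nat × Int)) : ∀ (b : Int) (bs : List Int),
    pvSetN (b :: bs) (ps.map (fun p => (p.1 + 1, p.2))) = b :: pvSetN bs ps := by
  induction ps with
  | nil => intro b bs; rfl
  | cons p ps ih => intro b bs; simp only [List.map_cons, pvSetN, List.set_cons_succ]; exact ih b _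

lemma pvFreeSet_shift (c : List Int) (js : List Nat) : ∀ (i : Int) (b : Int) (bs : List Int),
    pvFreeSet c (js.map (· + 1)) i (b :: bs) = b :: pvFreeSet c js i bs := by
  induction js with
  | nil => intro i b bs; rfl
  | cons j js ih => intro i b bs; simp only [List.map_cons, pvFreeSet, List.set_cons_succ]; exact ih _ _ _

lemma pvFreeSetEnum (c : List Int) (js : List Nat) : ∀ (i : Int) (b : List Int),
    (PySem.List.enumerate (js.map (fun j : Nat => (j : Int))) i).foldl
      (fun bits p => PySem.List.pySetD bits p.2 (PySem.List.pyGetD c p.1 0)) b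
    = pvFreeSet c js i b := by
  induction js with
  | nil => intro i b; simp [PySem.List.enumerate_nil, pvFreeSet]
  | cons j js ih =>
      intro i b
      rw [List.map_cons, PySem.List.enumerate_cons, List.foldl_cons]
      simp only [PySem.List.pySetD_natCast]
      exact ih _ _

lemma pvSetNEq (ps : List (Nat × Int)) : ∀ (bs : List Int),
    (ps.map (fun p => ((p.1 : Int), p.2))).foldl
      (fun b kv => PySem.List.pySetD b kv.1 kv.2) bs = pvSetN bs ps := by
  induction ps with
  | nil => intro bs; rfl
  | cons p ps ih =>
      intro bs
      rw [List.map_cons, List.foldl_cons]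
      simp only [PySem.List.pySetD_natCast]
      exact ih _

lemma pvA2 (g : List Int) : ∀ (c : List Int) (i : Int) (bs : List Int), bs.length = g.length →
    pvFreeSet c (pvFreeIdx g 0) i (pvSetN bs (pvFixedPairs g 0)) = pvMerge g c i := by
  induction g with
  | nil =>
      intro c i bs hlen
      rw [List.length_eq_zero_iff.mp hlen]
      rfl
  | cons v g ih =>
      intro c i bs hlen
      cases bs with
      | nil => simp at hlen
      | cons b bs =>
          simp only [List.length_cons] at hlen
          by_cases h1 : v = 1
          · simp only [pvFixedPairs, pvFreeIdx, pvMerge, h1, if_true, reduceIte]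
            rw [pvShiftFix g 0, pvShiftFree g 0]
            simp only [pvSetN, List.set_cons_zero]
            rw [pvSetN_shift, pvFreeSet_shift]
            rw [ih c i bs (by omega)]
          · by_cases h0 : v = 0
            · simp only [pvFixedPairs, pvFreeIdx, pvMerge, h0, h1, if_true, if_false, reduceIte, (by decide : ¬((0:Int) = 1)), (by decide : ¬((2:Int) = 1))]
              rw [pvShiftFix g 0, pvShiftFree g 0]
              simp only [pvSetN, List.set_cons_zero]
              rw [pvSetN_shift, pvFreeSet_shift]
              rw [ih c i bs (by omega)]
            · simp only [pvFixedPairs, pvFreeIdx, pvMerge, h0, h1, if_true, if_false, reduceIte, (by decide : ¬((0:Int) = 1)), (by decide : ¬((2:Int) = 1))]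
              rw [pvShiftFix g 0, pvShiftFree g 0]
              rw [pvSetN_shift]
              simp only [pvFreeSet, List.set_cons_zero]
              rw [pvFreeSet_shift]
              rw [ih c (i + 1) bs (by omega)]

lemma pvMerge_length (g : List Int) : ∀ c i, (pvMerge g c i).length = g.length := by
  induction g with
  | nil => intro c i; rfl
  | cons v g ih => intro c i; simp only [pvMerge]; split_ifs <;> simp [ih]

lemma pvBitsFold (bits : List Int) : ∀ acc : Int,
    bits.foldl (fun a b => a * 2 + b) acc = acc * 2 ^ bits.length + pvBitsToInt bits := by
  induction bits with
  | nil => intro acc; simp [pvBitsToInt]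
  | cons b bs ih =>
      intro acc
      simp only [pvBitsToInt, List.foldl_cons, List.length_cons]
      rw [ih (acc * 2 + b), ih (0 * 2 + b)]
      ring

lemma pvBitsCons (x : Int) (bits : List Int) :
    pvBitsToInt (x :: bits) = x * 2 ^ bits.length + pvBitsToInt bits := by
  show List.foldl (fun a b => a * 2 + b) (0 * 2 + x) bits = _
  rw [pvBitsFold bits (0 * 2 + x)]
  ring

@[simp] lemma pvDot_nil (ws : List Int) : pvDot [] ws = 0 := by cases ws <;> rfl

@[simp] lemma pvDot_cons (c w : Int) (cs ws : List Int) :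
    pvDot (c :: cs) (w :: ws) = c * w + pvDot cs ws := rfl

lemma pvVal (g : List Int) : ∀ (c : List Int) (i : Int),
    pvBitsToInt (pvMerge g c i) = pvBase g + pvDotFrom c i (pvWeights g) := by
  induction g with
  | nil => intro c i; simp [pvMerge, pvBase, pvWeights, pvDotFrom, pvBitsToInt]
  | cons v g ih =>
      intro c i
      by_cases h1 : v = 1
      · simp only [pvMerge, pvBase, pvWeights, h1, if_true, reduceIte]
        rw [pvBitsCons, pvMerge_length, ih]
        ring
      · by_cases h0 : v = 0
        · simp only [pvMerge, pvBase, pvWeights, h0, h1, if_true, if_false, reduceIte,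
            (by decide : ¬((0:Int) = 1))]
          rw [pvBitsCons, pvMerge_length, ih]
          ring
        · simp only [pvMerge, pvBase, pvWeights, pvDotFrom, h0, h1, if_true, if_false, reduceIte]
          rw [pvBitsCons, pvMerge_length, ih]
          ring

lemma pvDotFromDot (ws : List Int) : ∀ (c₀ c : List Int), c.length = ws.length →
    pvDotFrom (c₀ ++ c) ((c₀.length : Int)) ws = pvDot c ws := by
  induction ws with
  | nil =>
      intro c₀ c hlen
      rw [List.length_eq_zero_iff.mp hlen]
      rfl
  | cons w ws ih =>
      intro c₀ c hlen
      cases c with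
      | nil => simp at hlen
      | cons x c =>
          simp only [List.length_cons] at hlen
          simp only [pvDotFrom, pvDot_cons]
          have hget : PySem.List.pyGetD (c₀ ++ x :: c) ((c₀.length : Int)) 0 = x := by
            rw [PySem.List.pyGetD_natCast]
            simp [List.getD_eq_getElem?_getD]
          rw [hget]
          have hcast : ((c₀.length : Int) + 1) = (((c₀ ++ [x]).length : Nat) : Int) := by
            simp
          rw [hcast, show c₀ ++ x :: c = (c₀ ++ [x]) ++ c by simp]
          rw [ih (c₀ ++ [x]) c (by omega)]

lemma pvProdLen (m : Nat) : ∀ c ∈ pvProduct01 m, c.length = m := by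
  induction m with
  | zero => intro c hc; simp [pvProduct01] at hc; simp [hc]
  | succ m ih =>
      intro c hc
      simp only [pvProduct01, List.mem_append, List.mem_map] at hc
      rcases hc with ⟨d, hd, rfl⟩ | ⟨d, hd, rfl⟩ <;> simp [ih d hd]

lemma pvLenFreeW (g : List Int) : ∀ k, (pvFreeIdx g k).length = (pvWeights g).length := by
  induction g with
  | nil => intro k; rfl
  | cons v g ih => intro k; simp only [pvFreeIdx, pvWeights]; split_ifs <;> simp [ih]

lemma pvB1 (n : Nat) (g : List Int) : ∀ (k : Nat), k + g.length = n → ∀ (b : Int) (ws : List Int),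
    (PySem.List.enumerate g (k : Int)).foldl
      (fun (st : Int × List Int) iv =>
        if iv.2 = 1 then (st.1 + 2 ^ (n - 1 - iv.1.toNat), st.2)
        else if iv.2 ≠ 0 then (st.1, st.2 ++ [(2 : Int) ^ (n - 1 - iv.1.toNat)])
        else st) (b, ws)
    = (b + pvBase g, ws ++ pvWeights g) := by
  induction g with
  | nil =>
      intro k hk b ws
      simp [PySem.List.enumerate_nil, pvBase, pvWeights]
  | cons v g ih =>
      intro k hk b ws
      simp only [PySem.List.enumerate_cons, List.foldl_cons]
      have hpow : n - 1 - k = g.length := by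
        simp only [List.length_cons] at hk
        omega
      have hcast : ((k : Int) + 1) = ((k + 1 : Nat) : Int) := by push_cast; ring
      have hk' : (k + 1) + g.length = n := by simp only [List.length_cons] at hk; omega
      by_cases h1 : v = 1
      · have hstep : (if (((k : Int), v) : Int × Int).2 = 1 then (((b, ws) : Int × List Int).1 + 2 ^ (n - 1 - (((k : Int), v) : Int × Int).1.toNat), ((b, ws) : Int × List Int).2)
            else if (((k : Int), v) : Int × Int).2 ≠ 0 then (((b, ws) : Int × List Int).1, ((b, ws) : Int × List Int).2 ++ [(2 : Int) ^ (n - 1 - (((k : Int), v) : Int × Int).1.toNat)])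
            else ((b, ws) : Int × List Int))
            = ((b + 2 ^ g.length : Int), ws) := by simp [h1, hpow]
        rw [hstep, hcast, ih (k + 1) hk']
        simp [pvBase, pvWeights, h1, add_assoc]
      · by_cases h0 : v = 0
        · have hstep : (if (((k : Int), v) : Int × Int).2 = 1 then (((b, ws) : Int × List Int).1 + 2 ^ (n - 1 - (((k : Int), v) : Int × Int).1.toNat), ((b, ws) : Int × List Int).2)
              else if (((k : Int), v) : Int × Int).2 ≠ 0 then (((b, ws) : Int × List Int).1, ((b, ws) : Int × List Int).2 ++ [(2 : Int) ^ (n - 1 - (((k : Int), v) : Int × Int).1.toNat)])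
              else ((b, ws) : Int × List Int))
              = (b, ws) := by simp [h0, h1]
          rw [hstep, hcast, ih (k + 1) hk']
          simp [pvBase, pvWeights, h0, h1]
        · have hstep : (if (((k : Int), v) : Int × Int).2 = 1 then (((b, ws) : Int × List Int).1 + 2 ^ (n - 1 - (((k : Int), v) : Int × Int).1.toNat), ((b, ws) : Int × List Int).2)
              else if (((k : Int), v) : Int × Int).2 ≠ 0 then (((b, ws) : Int × List Int).1, ((b, ws) : Int × List Int).2 ++ [(2 : Int) ^ (n - 1 - (((k : Int), v) : Int × Int).1.toNat)])
              else ((b, ws) : Int × List Int))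
              = (b, ws ++ [(2 : Int) ^ g.length]) := by simp [h0, h1, hpow]
          rw [hstep, hcast, ih (k + 1) hk']
          simp [pvBase, pvWeights, h0, h1, List.append_assoc]

lemma pvB2 (ws : List Int) : ∀ (L : List Int),
    ws.foldl (fun vals w => vals.flatMap (fun x => [x, x + w])) L
    = L.flatMap (fun x => (pvProduct01 ws.length).map (fun c => x + pvDot c ws)) := by
  induction ws with
  | nil =>
      intro L
      simp [pvProduct01]
  | cons w ws ih =>
      intro L
      rw [List.foldl_cons, ih, List.flatMap_assoc]
      have hfun : (fun x : Int => List.flatMap (fun x => List.map (fun c => x + pvDot c ws) (pvProduct01 ws.length)) [x, x + w])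
          = (fun x : Int => List.map (fun c => x + pvDot c (w :: ws)) (pvProduct01 (w :: ws).length)) := by
        funext x
        simp [pvProduct01, List.map_map, Function.comp_def, add_assoc]
      rw [hfun]

lemma pvAltEq (gate : List Int) :
    gate_to_minterms_alt gate
    = (pvProduct01 (pvWeights gate).length).map (fun c => pvBase gate + pvDot c (pvWeights gate)) := by
  have h := pvB1 gate.length gate 0 (by simp) 0 []
  rw [Nat.cast_zero] at h
  simp only [gate_to_minterms_alt]
  rw [h]
  simp only [zero_add, List.nil_append]
  rw [pvB2 (pvWeights gate) [pvBase gate]]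
  simp

lemma pvAEq (gate : List Int) :
    gate_to_minterms gate
    = (pvProduct01 (pvFreeIdx gate 0).length).map
        (fun c => pvBitsToInt (pvMerge gate c 0)) := by
  obtain ⟨h1, h2⟩ := pvA1 gate 0 PySem.Dict.empty [] (by simp)
  rw [Nat.cast_zero] at h1 h2
  simp only [gate_to_minterms]
  rw [h1, h2]
  simp only [List.nil_append]
  rw [PySem.List.foldl_append_singleton_eq_map]
  simp only [List.nil_append, List.length_map]
  apply List.map_congr_left
  intro c hc
  have hempty : (PySem.Dict.empty : PySem.Dict Int Int).items = [] := rfl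
  rw [hempty, List.nil_append, pvSetNEq, pvFreeSetEnum]
  rw [pvA2 gate c 0 (List.replicate gate.length 0) (by simp)]

-- ===== VERDICT (by name: the statement is the Claim_ definition above) =====
theorem gate_to_minterms_spec : Claim_equal_gate_to_minterms := by
  intro gate _ _
  unfold Spec_gate_to_minterms
  rw [pvAEq, pvAltEq, pvLenFreeW gate 0]
  apply List.map_congr_left
  intro c hc
  rw [pvVal]
  have hlen : c.length = (pvWeights gate).length := pvProdLen _ c hc
  have := pvDotFromDot (pvWeights gate) [] c hlen
  simpa using this
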